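-- pv_equiv track=rewrite | github.com/KyungRyeolBaek/study | BaekJoon/Algorithm_study/24267 Bronze 알고리즘 수업 - 알고리즘의 수행 시간 6.py | MenOfPassion
-- ===== SOURCE A (Python) =====
-- def MenOfPassion(n, count=0, bigO=0):
--     sum = 0
--     for i in range(1, n - 1):
--         for j in range(i + 1, n):
--             for k in range(j + 1, n + 1):
--                 sum += i * j * k
--                 count += 1
--     bigO += 2
--     return sum, count, bigO
-- ===== SOURCE B (Python) =====
-- def MenOfPassion(n, count=0, bigO=0):
--     # closed form: sum of i*j*k over 1 <= i < j < k <= n is the elementary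
--     # symmetric polynomial e3(1..n), via Newton's power-sum identities;
--     # the number of triples is C(n, 3).
--     m = max(n, 0)
--     p1 = m * (m + 1) // 2                 # sum of 1..m
--     p2 = m * (m + 1) * (2 * m + 1) // 6   # sum of squares
--     e3 = (p1 ** 3 - 3 * p1 * p2 + 2 * (p1 * p1)) // 6   # sum of cubes = p1*p1
--     return e3, count + m * (m - 1) * (m - 2) // 6, bigO + 2
-- ===== Notes on version B (the rewrite author's own statement) =====
-- stated objective: faster
-- what changed: replaced the triple nested loop with O(1) closed forms: the sum is e3(1..n) computed from power sums via Newton's identities and the count increment is C(n,3)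
import Mathlib
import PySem

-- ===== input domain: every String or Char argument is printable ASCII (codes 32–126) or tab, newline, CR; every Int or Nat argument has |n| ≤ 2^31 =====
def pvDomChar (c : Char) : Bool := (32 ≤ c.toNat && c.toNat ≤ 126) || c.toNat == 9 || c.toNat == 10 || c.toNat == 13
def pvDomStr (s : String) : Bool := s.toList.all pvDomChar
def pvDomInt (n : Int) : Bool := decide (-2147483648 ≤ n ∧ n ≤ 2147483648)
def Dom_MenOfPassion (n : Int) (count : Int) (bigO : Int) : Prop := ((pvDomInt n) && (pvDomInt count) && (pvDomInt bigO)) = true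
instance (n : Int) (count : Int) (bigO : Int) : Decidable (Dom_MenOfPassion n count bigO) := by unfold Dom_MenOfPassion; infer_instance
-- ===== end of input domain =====

-- B replaces A's triple nested loop by closed forms: e3(1..n) via Newton's identities and C(n,3).

-- ===== PORT A =====
def MenOfPassion (n : Int) (count : Int) (bigO : Int) : List Int :=
  let sc := (PySem.List.pyRange 1 (n - 1) 1).foldl (fun (sc : Int × Int) i =>
      (PySem.List.pyRange (i + 1) n 1).foldl (fun (sc : Int × Int) j =>
        (PySem.List.pyRange (j + 1) (n + 1) 1).foldl
          (fun (sc : Int × Int) k => (sc.1 + i * j * k, sc.2 + 1)) sc) sc) (0, count)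
  [sc.1, sc.2, bigO + 2]

-- ===== PORT B =====
def MenOfPassion_alt (n : Int) (count : Int) (bigO : Int) : List Int :=
  let m := max n 0
  let p1 := PySem.Int.floordiv (m * (m + 1)) 2
  let p2 := PySem.Int.floordiv (m * (m + 1) * (2 * m + 1)) 6
  let e3 := PySem.Int.floordiv (p1 ^ 3 - 3 * p1 * p2 + 2 * (p1 * p1)) 6
  [e3, count + PySem.Int.floordiv (m * (m - 1) * (m - 2)) 6, bigO + 2]

-- ===== PRECONDITION & SPEC =====
def Spec_MenOfPassion (n : Int) (count : Int) (bigO : Int) (out : List Int) : Prop := out = MenOfPassion_alt n count bigO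
instance (n : Int) (count : Int) (bigO : Int) (out : List Int) : Decidable (Spec_MenOfPassion n count bigO out) := by unfold Spec_MenOfPassion; infer_instance

-- ===== CLAIM (what is proved, stated in full; the proofs are below) =====
def Claim_equal_MenOfPassion : Prop := ∀ (n : Int) (count : Int) (bigO : Int), Dom_MenOfPassion n count bigO → Spec_MenOfPassion n count bigO (MenOfPassion n count bigO)

-- ===== LEMMAS AND PROOFS =====

-- triple/double sums over integer intervals, matching A's loop bounds
noncomputable def pvD3 (t : Int → Int → Int → Int) (n : Int) : Int :=
  ∑ i ∈ Finset.Icc 1 (n - 2), ∑ j ∈ Finset.Icc (i + 1) (n - 1), ∑ k ∈ Finset.Icc (j + 1) n, t i j k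
noncomputable def pvD2 (g : Int → Int → Int) (n : Int) : Int :=
  ∑ i ∈ Finset.Icc 1 (n - 1), ∑ j ∈ Finset.Icc (i + 1) n, g i j

-- recursively defined power/elementary-symmetric sums and pair/triple counts
def pvs1 : Nat → Int | 0 => 0 | (m+1) => pvs1 m + ((m : Int) + 1)
def pvs2 : Nat → Int | 0 => 0 | (m+1) => pvs2 m + ((m : Int) + 1) ^ 2
def pve2 : Nat → Int | 0 => 0 | (m+1) => pve2 m + ((m : Int) + 1) * pvs1 m
def pve3 : Nat → Int | 0 => 0 | (m+1) => pve3 m + ((m : Int) + 1) * pve2 m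
def pvc2 : Nat → Int | 0 => 0 | (m+1) => pvc2 m + (m : Int)
def pvc3 : Nat → Int | 0 => 0 | (m+1) => pvc3 m + pvc2 m

lemma foldl_pair_add (F : Int × Int → Int → Int × Int) (G H : Int → Int)
    (hF : ∀ (sc : Int × Int) (x : Int), F sc x = (sc.1 + G x, sc.2 + H x)) :
    ∀ (l : List Int) (sc : Int × Int),
      l.foldl F sc = (sc.1 + (l.map G).sum, sc.2 + (l.map H).sum) := by
  intro l
  induction l with
  | nil => intro sc; simp
  | cons a t ih =>
      intro sc
      rw [List.foldl_cons, ih, hF]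
      simp [add_assoc]

-- peel the top element of an Icc-sum over Int
lemma sum_Icc_top (a b : Int) (h : a ≤ b) (f : Int → Int) :
    ∑ x ∈ Finset.Icc a b, f x = (∑ x ∈ Finset.Icc a (b - 1), f x) + f b := by
  have hins : Finset.Icc a b = insert b (Finset.Icc a (b - 1)) := by
    ext x; simp only [Finset.mem_Icc, Finset.mem_insert]; omega
  rw [hins, Finset.sum_insert (by simp only [Finset.mem_Icc]; omega)]
  exact add_comm _ _

lemma sum_pyRange_aux (f : Int → Int) (a : Int) :
    ∀ (k : Nat), ((PySem.List.pyRange a (a + k) 1).map f).sum = ∑ x ∈ Finset.Icc a (a + k - 1), f x := by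
  intro k
  induction k with
  | zero =>
      rw [Finset.Icc_eq_empty (by omega)]
      simp [PySem.List.pyRange_one_eq_nil le_rfl]
  | succ k ih =>
      have h1 : a + ((k : Int) + 1) = (a + k) + 1 := by ring
      rw [show ((k + 1 : Nat) : Int) = (k : Int) + 1 by push_cast; ring, h1,
        PySem.List.pyRange_one_succ_right (by omega), List.map_append, List.sum_append, ih,
        sum_Icc_top a ((a + k) + 1 - 1) (by omega) f,
        show a + (k : Int) + 1 - 1 - 1 = a + (k : Int) - 1 by ring,
        show a + (k : Int) + 1 - 1 = a + (k : Int) by ring]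
      simp

lemma sum_pyRange (f : Int → Int) (a b : Int) :
    ((PySem.List.pyRange a b 1).map f).sum = ∑ x ∈ Finset.Icc a (b - 1), f x := by
  rcases le_or_gt a b with h | h
  · have := sum_pyRange_aux f a (b - a).toNat
    rwa [show a + ((b - a).toNat : Int) = b by omega] at this
  · rw [PySem.List.pyRange_one_eq_nil (by omega), Finset.Icc_eq_empty (by omega)]; simp

lemma D2_succ (g : Int → Int → Int) (n : Int) (hn : 0 ≤ n) :
    pvD2 g (n + 1) = pvD2 g n + ∑ i ∈ Finset.Icc 1 n, g i (n + 1) := by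
  unfold pvD2
  rw [show n + 1 - 1 = n from by ring]
  have h1 : ∀ i ∈ Finset.Icc (1 : Int) n,
      (∑ j ∈ Finset.Icc (i + 1) (n + 1), g i j)
        = (∑ j ∈ Finset.Icc (i + 1) n, g i j) + g i (n + 1) := by
    intro i hi
    rw [sum_Icc_top (i + 1) (n + 1) (by simp only [Finset.mem_Icc] at hi; omega),
      show n + 1 - 1 = n from by ring]
  rw [Finset.sum_congr rfl h1, Finset.sum_add_distrib]
  congr 1
  rcases lt_or_ge n 1 with h2 | h2
  · have e1 : Finset.Icc (1 : Int) n = Finset.Icc (1 : Int) (n - 1) := by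
      ext x; simp only [Finset.mem_Icc]; omega
    rw [e1]
  · rw [sum_Icc_top 1 n h2]
    have e2 : Finset.Icc (n + 1) n = (∅ : Finset Int) := Finset.Icc_eq_empty (by omega)
    rw [e2]
    simp

lemma D3_succ (t : Int → Int → Int → Int) (n : Int) (hn : 0 ≤ n) :
    pvD3 t (n + 1) = pvD3 t n + pvD2 (fun i j => t i j (n + 1)) n := by
  unfold pvD3 pvD2
  rw [show n + 1 - 2 = n - 1 from by ring, show n + 1 - 1 = n from by ring]
  have h1 : ∀ i ∈ Finset.Icc (1 : Int) (n - 1),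
      (∑ j ∈ Finset.Icc (i + 1) n, ∑ k ∈ Finset.Icc (j + 1) (n + 1), t i j k)
        = (∑ j ∈ Finset.Icc (i + 1) n, ∑ k ∈ Finset.Icc (j + 1) n, t i j k)
          + ∑ j ∈ Finset.Icc (i + 1) n, t i j (n + 1) := by
    intro i _
    rw [← Finset.sum_add_distrib]
    refine Finset.sum_congr rfl (fun j hj => ?_)
    rw [sum_Icc_top (j + 1) (n + 1) (by simp only [Finset.mem_Icc] at hj; omega),
      show n + 1 - 1 = n from by ring]
  rw [Finset.sum_congr rfl h1, Finset.sum_add_distrib]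
  congr 1
  -- drop the vanishing j = n row, then the vanishing i = n - 1 row
  have h2 : ∀ i ∈ Finset.Icc (1 : Int) (n - 1),
      (∑ j ∈ Finset.Icc (i + 1) n, ∑ k ∈ Finset.Icc (j + 1) n, t i j k)
        = ∑ j ∈ Finset.Icc (i + 1) (n - 1), ∑ k ∈ Finset.Icc (j + 1) n, t i j k := by
    intro i hi
    rw [sum_Icc_top (i + 1) n (by simp only [Finset.mem_Icc] at hi; omega)]
    have e2 : Finset.Icc (n + 1) n = (∅ : Finset Int) := Finset.Icc_eq_empty (by omega)
    rw [e2]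
    simp
  rw [Finset.sum_congr rfl h2]
  rcases lt_or_ge n 2 with h3 | h3
  · have e3 : Finset.Icc (1 : Int) (n - 1) = Finset.Icc (1 : Int) (n - 2) := by
      ext x; simp only [Finset.mem_Icc]; omega
    rw [e3]
  · rw [sum_Icc_top 1 (n - 1) (by omega), show n - 1 - 1 = n - 2 from by ring]
    have e4 : Finset.Icc ((n - 1) + 1) (n - 1) = (∅ : Finset Int) := Finset.Icc_eq_empty (by omega)
    rw [e4]
    simp

lemma sum_Icc_id (m : Nat) : (∑ i ∈ Finset.Icc 1 (m : Int), i) = pvs1 m := by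
  induction m with
  | zero => simp [pvs1]
  | succ m ih =>
      rw [show ((m + 1 : Nat) : Int) = (m : Int) + 1 by push_cast; ring,
        sum_Icc_top 1 ((m : Int) + 1) (by omega), show (m : Int) + 1 - 1 = (m : Int) from by ring, ih]
      simp [pvs1]

lemma sum_Icc_one (m : Nat) : (∑ _i ∈ Finset.Icc 1 (m : Int), (1 : Int)) = (m : Int) := by
  induction m with
  | zero => simp
  | succ m ih =>
      rw [show ((m + 1 : Nat) : Int) = (m : Int) + 1 by push_cast; ring,
        sum_Icc_top 1 ((m : Int) + 1) (by omega), show (m : Int) + 1 - 1 = (m : Int) from by ring, ih]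

lemma D2_mul (c : Int) (m : Nat) : pvD2 (fun i j => i * j * c) (m : Int) = c * pve2 m := by
  induction m with
  | zero =>
      unfold pvD2
      rw [Finset.Icc_eq_empty (by omega)]
      simp [pve2]
  | succ m ih =>
      rw [show ((m + 1 : Nat) : Int) = (m : Int) + 1 by push_cast; ring,
        D2_succ _ _ (by omega), ih]
      have h : (∑ i ∈ Finset.Icc 1 (m : Int), i * ((m : Int) + 1) * c)
          = ((m : Int) + 1) * c * ∑ i ∈ Finset.Icc 1 (m : Int), i := by
        rw [Finset.mul_sum]
        exact Finset.sum_congr rfl (fun x _ => by ring)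
      rw [h, sum_Icc_id]
      simp only [pve2]
      ring

lemma D2_one (m : Nat) : pvD2 (fun _ _ => (1 : Int)) (m : Int) = pvc2 m := by
  induction m with
  | zero =>
      unfold pvD2
      rw [Finset.Icc_eq_empty (by omega)]
      simp [pvc2]
  | succ m ih =>
      rw [show ((m + 1 : Nat) : Int) = (m : Int) + 1 by push_cast; ring,
        D2_succ _ _ (by omega), ih, sum_Icc_one]
      simp [pvc2]

lemma D3_mul (m : Nat) : pvD3 (fun i j k => i * j * k) (m : Int) = pve3 m := by
  induction m with
  | zero =>
      unfold pvD3
      rw [Finset.Icc_eq_empty (by omega)]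
      simp [pve3]
  | succ m ih =>
      rw [show ((m + 1 : Nat) : Int) = (m : Int) + 1 by push_cast; ring,
        D3_succ _ _ (by omega), ih]
      have h : pvD2 (fun i j => i * j * ((m : Int) + 1)) (m : Int) = ((m : Int) + 1) * pve2 m :=
        D2_mul ((m : Int) + 1) m
      rw [h]
      simp [pve3]

lemma D3_one (m : Nat) : pvD3 (fun _ _ _ => (1 : Int)) (m : Int) = pvc3 m := by
  induction m with
  | zero =>
      unfold pvD3
      rw [Finset.Icc_eq_empty (by omega)]
      simp [pvc3]
  | succ m ih =>
      rw [show ((m + 1 : Nat) : Int) = (m : Int) + 1 by push_cast; ring,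
        D3_succ _ _ (by omega), ih]
      have h : pvD2 (fun _ _ => (1 : Int)) (m : Int) = pvc2 m := D2_one m
      rw [h]
      simp [pvc3]

lemma hs1 (m : Nat) : 2 * pvs1 m = (m : Int) * ((m : Int) + 1) := by
  induction m with
  | zero => simp [pvs1]
  | succ m ih => simp only [pvs1]; push_cast; linear_combination ih

lemma hs2 (m : Nat) : 6 * pvs2 m = (m : Int) * ((m : Int) + 1) * (2 * (m : Int) + 1) := by
  induction m with
  | zero => simp [pvs2]
  | succ m ih => simp only [pvs2]; push_cast; linear_combination ih

lemma hc2 (m : Nat) : 2 * pvc2 m = (m : Int) * ((m : Int) - 1) := by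
  induction m with
  | zero => simp [pvc2]
  | succ m ih => simp only [pvc2]; push_cast; linear_combination ih

lemma hc3 (m : Nat) : 6 * pvc3 m = (m : Int) * ((m : Int) - 1) * ((m : Int) - 2) := by
  induction m with
  | zero => simp [pvc3]
  | succ m ih => simp only [pvc3]; push_cast; linear_combination ih + 3 * hc2 m

lemma he2 (m : Nat) : 2 * pve2 m = pvs1 m ^ 2 - pvs2 m := by
  induction m with
  | zero => simp [pve2, pvs1, pvs2]
  | succ m ih =>
      simp only [pve2, pvs1, pvs2]
      linear_combination ih

lemma he3 (m : Nat) :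
    6 * pve3 m = pvs1 m ^ 3 - 3 * pvs1 m * pvs2 m + 2 * (pvs1 m * pvs1 m) := by
  induction m with
  | zero => simp [pve3, pvs1, pvs2]
  | succ m ih =>
      simp only [pve3, pvs1, pvs2]
      linear_combination ih + 3 * ((m : Int) + 1) * he2 m - 2 * ((m : Int) + 1) * hs1 m

lemma A_eval (n count bigO : Int) :
    MenOfPassion n count bigO =
      [pvD3 (fun i j k => i * j * k) n, count + pvD3 (fun _ _ _ => (1 : Int)) n, bigO + 2] := by
  have hin : ∀ (i j : Int) (sc : Int × Int),
      (PySem.List.pyRange (j + 1) (n + 1) 1).foldl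
          (fun (sc : Int × Int) k => (sc.1 + i * j * k, sc.2 + 1)) sc
        = (sc.1 + ((PySem.List.pyRange (j + 1) (n + 1) 1).map (fun k => i * j * k)).sum,
           sc.2 + ((PySem.List.pyRange (j + 1) (n + 1) 1).map (fun _ => (1 : Int))).sum) :=
    fun i j sc => foldl_pair_add _ (fun k => i * j * k) (fun _ => (1 : Int)) (fun _ _ => rfl) _ sc
  have hmid : ∀ (i : Int) (sc : Int × Int),
      (PySem.List.pyRange (i + 1) n 1).foldl
          (fun (sc : Int × Int) j => (PySem.List.pyRange (j + 1) (n + 1) 1).foldl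
            (fun (sc : Int × Int) k => (sc.1 + i * j * k, sc.2 + 1)) sc) sc
        = (sc.1 + ((PySem.List.pyRange (i + 1) n 1).map (fun j =>
              ((PySem.List.pyRange (j + 1) (n + 1) 1).map (fun k => i * j * k)).sum)).sum,
           sc.2 + ((PySem.List.pyRange (i + 1) n 1).map (fun j =>
              ((PySem.List.pyRange (j + 1) (n + 1) 1).map (fun _ => (1 : Int))).sum)).sum) :=
    fun i sc => foldl_pair_add _ _ _ (fun sc' j => hin i j sc') _ sc
  have hout := foldl_pair_add _ _ _ (fun (sc : Int × Int) i => hmid i sc)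
      (PySem.List.pyRange 1 (n - 1) 1) ((0 : Int), count)
  unfold MenOfPassion
  rw [hout]
  simp only [sum_pyRange, pvD3]
  rw [show n - 1 - 1 = n - 2 from by ring, show n + 1 - 1 = n from by ring]
  simp

lemma alt_eval_nat (m : Nat) (count bigO : Int) :
    MenOfPassion_alt (m : Int) count bigO = [pve3 m, count + pvc3 m, bigO + 2] := by
  have hp1 : PySem.Int.floordiv ((m : Int) * ((m : Int) + 1)) 2 = pvs1 m := by
    rw [show (m : Int) * ((m : Int) + 1) = 2 * pvs1 m from (hs1 m).symm,
      PySem.Int.floordiv_eq_ediv_of_pos (by norm_num)]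
    exact Int.mul_ediv_cancel_left _ (by norm_num)
  have hp2 : PySem.Int.floordiv ((m : Int) * ((m : Int) + 1) * (2 * (m : Int) + 1)) 6 = pvs2 m := by
    rw [show (m : Int) * ((m : Int) + 1) * (2 * (m : Int) + 1) = 6 * pvs2 m from (hs2 m).symm,
      PySem.Int.floordiv_eq_ediv_of_pos (by norm_num)]
    exact Int.mul_ediv_cancel_left _ (by norm_num)
  have hcnt : PySem.Int.floordiv ((m : Int) * ((m : Int) - 1) * ((m : Int) - 2)) 6 = pvc3 m := by
    rw [show (m : Int) * ((m : Int) - 1) * ((m : Int) - 2) = 6 * pvc3 m from (hc3 m).symm,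
      PySem.Int.floordiv_eq_ediv_of_pos (by norm_num)]
    exact Int.mul_ediv_cancel_left _ (by norm_num)
  have he : PySem.Int.floordiv (pvs1 m ^ 3 - 3 * pvs1 m * pvs2 m + 2 * (pvs1 m * pvs1 m)) 6
      = pve3 m := by
    rw [show pvs1 m ^ 3 - 3 * pvs1 m * pvs2 m + 2 * (pvs1 m * pvs1 m) = 6 * pve3 m
        from (he3 m).symm,
      PySem.Int.floordiv_eq_ediv_of_pos (by norm_num)]
    exact Int.mul_ediv_cancel_left _ (by norm_num)
  unfold MenOfPassion_alt
  rw [max_eq_left (by exact_mod_cast Int.natCast_nonneg m)]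
  simp only [hp1, hp2, hcnt, he]

lemma A_eval_nat (m : Nat) (count bigO : Int) :
    MenOfPassion (m : Int) count bigO = [pve3 m, count + pvc3 m, bigO + 2] := by
  rw [A_eval, D3_mul, D3_one]

lemma neg_case (n count bigO : Int) (hn : n < 0) :
    MenOfPassion n count bigO = MenOfPassion_alt n count bigO := by
  unfold MenOfPassion MenOfPassion_alt
  rw [PySem.List.pyRange_one_eq_nil (by omega), max_eq_right (le_of_lt hn)]
  norm_num

-- ===== VERDICT (by name: the statement is the Claim_ definition above) =====
theorem MenOfPassion_spec : Claim_equal_MenOfPassion := by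
  intro n count bigO _
  unfold Spec_MenOfPassion
  rcases le_or_gt 0 n with h | h
  · obtain ⟨m, rfl⟩ := Int.eq_ofNat_of_zero_le h
    rw [A_eval_nat, alt_eval_nat]
  · exact neg_case n count bigO h
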